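-- pv_equiv track=rewrite | github.com/white0nyx/TimeTrackerBot | tgbot/misc/analytics.py | get_range_hours
-- ===== SOURCE A (Python) =====
-- def get_range_hours(start, stop):
--     """Получение промежутка часов"""
--     result = []
--
--     if stop < start:
--         no_hours = []
--         for i in range(start - 1, stop, -1):
--             no_hours.append(i)
--
--         for i in range(0, 24):
--             if i not in no_hours:
--                 result.append(i)
--
--     else:
--         for i in range(start, stop + 1):
--             result.append(i)
--
--     return result
-- ===== SOURCE B (Python) =====
-- def get_range_hours(start, stop):
--     """Получение промежутка часов"""
--     if stop < start:
--         # wrap around midnight: low segment 0..stop, then high segment start..23,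
--         # each clamped to the 0..23 clock face
--         return list(range(0, min(stop + 1, 24))) + list(range(max(start, 0), 24))
--     return list(range(start, stop + 1))
-- ===== Notes on version B (the rewrite author's own statement) =====
-- stated objective: simpler
-- what changed: The wrap branch no longer materialises a no_hours exclusion list and filters 0..23 by membership scans; B builds the answer directly as the concatenation of two clamped ranges, range(0, min(stop+1,24)) + range(max(start,0), 24).
import Mathlib
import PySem

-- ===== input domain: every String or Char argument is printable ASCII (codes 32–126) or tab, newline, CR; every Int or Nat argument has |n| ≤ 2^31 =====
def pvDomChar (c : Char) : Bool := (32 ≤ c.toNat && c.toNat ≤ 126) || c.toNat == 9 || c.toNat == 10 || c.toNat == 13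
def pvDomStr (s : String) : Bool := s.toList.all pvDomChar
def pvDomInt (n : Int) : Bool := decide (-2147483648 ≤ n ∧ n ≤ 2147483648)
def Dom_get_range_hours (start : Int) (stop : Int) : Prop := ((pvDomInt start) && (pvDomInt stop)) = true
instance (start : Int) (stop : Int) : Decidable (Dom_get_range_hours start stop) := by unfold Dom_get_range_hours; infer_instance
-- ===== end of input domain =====

-- B replaces A's exclusion-list-and-membership-filter wrap branch by direct concatenation
-- of two clamped ranges (simpler: no exclusion list is built and no membership scan runs).

-- ===== PORT A =====
def get_range_hours (start : Int) (stop : Int) : List Int :=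
  if stop < start then
    let no_hours : List Int :=
      (PySem.List.pyRange (start - 1) stop (-1)).foldl (fun acc i => acc ++ [i]) []
    (PySem.List.pyRange 0 24 1).foldl
      (fun acc i => if i ∉ no_hours then acc ++ [i] else acc) []
  else
    (PySem.List.pyRange start (stop + 1) 1).foldl (fun acc i => acc ++ [i]) []

-- ===== PORT B =====
def get_range_hours_alt (start : Int) (stop : Int) : List Int :=
  if stop < start then
    PySem.List.pyRange 0 (min (stop + 1) 24) 1 ++ PySem.List.pyRange (max start 0) 24 1
  else
    PySem.List.pyRange start (stop + 1) 1

-- ===== PRECONDITION & SPEC =====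
def Spec_get_range_hours (start : Int) (stop : Int) (out : List Int) : Prop := out = get_range_hours_alt start stop
instance (start : Int) (stop : Int) (out : List Int) : Decidable (Spec_get_range_hours start stop out) := by unfold Spec_get_range_hours; infer_instance

-- ===== CLAIM (what is proved, stated in full; the proofs are below) =====
def Claim_equal_get_range_hours : Prop := ∀ (start : Int) (stop : Int), Dom_get_range_hours start stop → Spec_get_range_hours start stop (get_range_hours start stop)

-- ===== LEMMAS AND PROOFS =====

-- The hours 0..n-1 lying outside the open-below interval (t, s) are exactly the two
-- clamped range segments, in ascending order.
theorem pv_filter_seg (t s : Int) (ht : t < s) (n : ℕ) :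
    (PySem.List.pyRange 0 (n : Int) 1).filter (fun x => decide (x ≤ t ∨ s ≤ x))
      = PySem.List.pyRange 0 (min (t + 1) (n : Int)) 1
          ++ PySem.List.pyRange (max s 0) (n : Int) 1 := by
  induction n with
  | zero =>
      rw [PySem.List.pyRange_one_eq_nil (by omega), PySem.List.pyRange_one_eq_nil (by omega),
        PySem.List.pyRange_one_eq_nil (by omega)]
      rfl
  | succ n ih =>
      have hcast : ((n + 1 : ℕ) : Int) = (n : Int) + 1 := by push_cast; ring
      rw [hcast, PySem.List.pyRange_one_succ_right (by positivity), List.filter_append, ih]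
      by_cases h1 : (n : Int) ≤ t
      · -- n still in the low segment; high segments empty on both sides
        rw [min_eq_right (by omega), min_eq_right (by omega),
          PySem.List.pyRange_one_eq_nil (show (n : Int) ≤ max s 0 by omega),
          PySem.List.pyRange_one_eq_nil (show (n : Int) + 1 ≤ max s 0 by omega),
          PySem.List.pyRange_one_succ_right (by positivity)]
        simp [h1]
      · by_cases h2 : s ≤ (n : Int)
        · -- n extends the high segment
          rw [min_eq_left (by omega), min_eq_left (by omega),
            PySem.List.pyRange_one_succ_right (show max s 0 ≤ (n : Int) by omega)]
          simp [h2, List.append_assoc]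
        · -- n is excluded
          rw [min_eq_left (by omega), min_eq_left (by omega),
            PySem.List.pyRange_one_eq_nil (show (n : Int) ≤ max s 0 by omega),
            PySem.List.pyRange_one_eq_nil (show (n : Int) + 1 ≤ max s 0 by omega)]
          simp [h1, h2]

-- ===== VERDICT (by name: the statement is the Claim_ definition above) =====
theorem get_range_hours_spec : Claim_equal_get_range_hours := by
  intro start stop _
  unfold Spec_get_range_hours get_range_hours get_range_hours_alt
  by_cases h : stop < start
  · simp only [if_pos h, PySem.List.foldl_append_singleton_eq_self,
      PySem.List.foldl_append_ite_eq_filter, List.nil_append]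
    have hf : (PySem.List.pyRange 0 24 1).filter
          (fun x => decide (x ∉ PySem.List.pyRange (start - 1) stop (-1)))
        = (PySem.List.pyRange 0 24 1).filter (fun x => decide (x ≤ stop ∨ start ≤ x)) := by
      apply List.filter_congr
      intro x _
      simp only [decide_eq_decide, PySem.List.mem_pyRange_neg_one]
      omega
    have h24 : ((24 : ℕ) : Int) = (24 : Int) := by norm_num
    rw [hf, ← h24, pv_filter_seg stop start h 24, h24]
  · simp only [if_neg h, PySem.List.foldl_append_singleton_eq_self, List.nil_append]
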